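-- pv_equiv track=rewrite | github.com/hr1juldey/Wapi_bot | wapibot/backend/src/dspy_modules/metrics/intent_metric.py | _is_related_action
-- ===== SOURCE A (Python) =====
-- def _is_related_action(next_step: str, action: str) -> bool:
--     """Check if predicted next step is related to actual action."""
--     related_keywords = [
--         ("collect", "extract", "gather"),
--         ("validate", "check", "verify"),
--         ("confirm", "approve", "accept"),
--         ("respond", "reply", "answer")
--     ]
--
--     for keywords in related_keywords:
--         if any(k in next_step for k in keywords) and any(k in action for k in keywords):
--             return True
--
--     return False
-- ===== SOURCE B (Python) =====
-- # Flattened same-group keyword-pair table: related iff some pair (k1, k2) from the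
-- # same group has k1 in next_step and k2 in action.
-- _GROUPS = [
--     ("collect", "extract", "gather"),
--     ("validate", "check", "verify"),
--     ("confirm", "approve", "accept"),
--     ("respond", "reply", "answer"),
-- ]
--
-- _PAIRS = [(k1, k2) for g in _GROUPS for k1 in g for k2 in g]
--
--
-- def _is_related_action(next_step: str, action: str) -> bool:
--     """Check if predicted next step is related to actual action."""
--     return any(k1 in next_step and k2 in action for k1, k2 in _PAIRS)
-- ===== Notes on version B (the rewrite author's own statement) =====
-- stated objective: alternative
-- what changed: A loops over keyword groups testing per group whether both strings match some keyword of that group; B precomputes a flat table of all same-group keyword pairs and does a single linear scan over pairs asking for one pair (k1, k2) with k1 in next_step and k2 in action, correct by distributivity of AND over OR within each group.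
import Mathlib
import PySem

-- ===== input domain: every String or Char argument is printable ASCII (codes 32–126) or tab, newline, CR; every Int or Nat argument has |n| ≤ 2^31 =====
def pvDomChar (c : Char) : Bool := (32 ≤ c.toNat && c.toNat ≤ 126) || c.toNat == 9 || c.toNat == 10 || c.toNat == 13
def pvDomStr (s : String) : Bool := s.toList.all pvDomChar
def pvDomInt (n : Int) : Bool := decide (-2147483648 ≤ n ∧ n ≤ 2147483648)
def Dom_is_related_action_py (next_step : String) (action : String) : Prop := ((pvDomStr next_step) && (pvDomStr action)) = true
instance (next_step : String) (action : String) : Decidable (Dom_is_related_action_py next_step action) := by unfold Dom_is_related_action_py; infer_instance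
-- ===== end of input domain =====

-- B replaces A's per-group both-match loop by a precomputed flat table of same-group
-- keyword pairs scanned once (objective: alternative decomposition).

-- ===== PORT A =====
-- A's local list `related_keywords`
def relatedKeywordsA : List (List String) :=
  [["collect", "extract", "gather"],
   ["validate", "check", "verify"],
   ["confirm", "approve", "accept"],
   ["respond", "reply", "answer"]]

-- `for keywords in related_keywords: if any(... next_step) and any(... action): return True` / `return False`
def aLoop (next_step : String) (action : String) : List (List String) → Bool
  | [] => false
  | ks :: rest =>
      if (ks.any fun k => PySem.Str.isIn k next_step) && (ks.any fun k => PySem.Str.isIn k action)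
      then true
      else aLoop next_step action rest

def is_related_action_py (next_step : String) (action : String) : Bool :=
  aLoop next_step action relatedKeywordsA


-- ===== PORT B =====
-- B's module constant `_GROUPS`
def relatedGroupsB : List (List String) :=
  [["collect", "extract", "gather"],
   ["validate", "check", "verify"],
   ["confirm", "approve", "accept"],
   ["respond", "reply", "answer"]]

-- `_PAIRS = [(k1, k2) for g in _GROUPS for k1 in g for k2 in g]`
def relatedPairsB : List (String × String) :=
  relatedGroupsB.flatMap fun g => g.flatMap fun k1 => g.map fun k2 => (k1, k2)

-- `any(k1 in next_step and k2 in action for k1, k2 in _PAIRS)`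
def is_related_action_py_alt (next_step : String) (action : String) : Bool :=
  relatedPairsB.any fun p => PySem.Str.isIn p.1 next_step && PySem.Str.isIn p.2 action


-- ===== PRECONDITION & SPEC =====
def Spec_is_related_action_py (next_step : String) (action : String) (out : Bool) : Prop := out = is_related_action_py_alt next_step action
instance (next_step : String) (action : String) (out : Bool) : Decidable (Spec_is_related_action_py next_step action out) := by unfold Spec_is_related_action_py; infer_instance

-- ===== CLAIM (what is proved, stated in full; the proofs are below) =====
def Claim_equal_is_related_action_py : Prop := ∀ (next_step : String) (action : String), Dom_is_related_action_py next_step action → Spec_is_related_action_py next_step action (is_related_action_py next_step action)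

-- ===== LEMMAS AND PROOFS =====
-- `if c then true else r` on Bool is `c || r`
theorem pv_if_or (c r : Bool) : (if c = true then true else r) = (c || r) := by
  cases c <;> simp

-- distributivity of one group's both-match test over the nine same-group pairs
theorem pv_group_distrib (b1 b2 b3 c1 c2 c3 r : Bool) :
    (((b1 || (b2 || b3)) && (c1 || (c2 || c3))) || r)
    = (b1 && c1 || (b1 && c2 || (b1 && c3 || (b2 && c1 || (b2 && c2 || (b2 && c3 ||
       (b3 && c1 || (b3 && c2 || (b3 && c3 || r))))))))) := by
  cases b1 <;> cases b2 <;> cases b3 <;> cases c1 <;> cases c2 <;> cases c3 <;> simp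

-- the same for the final group (no tail)
theorem pv_group_last (b1 b2 b3 c1 c2 c3 : Bool) :
    ((b1 || (b2 || b3)) && (c1 || (c2 || c3)))
    = (b1 && c1 || (b1 && c2 || (b1 && c3 || (b2 && c1 || (b2 && c2 || (b2 && c3 ||
       (b3 && c1 || (b3 && c2 || b3 && c3)))))))) := by
  cases b1 <;> cases b2 <;> cases b3 <;> cases c1 <;> cases c2 <;> cases c3 <;> simp

-- ===== VERDICT (by name: the statement is the Claim_ definition above) =====
theorem is_related_action_py_spec : Claim_equal_is_related_action_py := by
  intro n a _
  unfold Spec_is_related_action_py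
  simp only [is_related_action_py, is_related_action_py_alt, aLoop, relatedKeywordsA,
    relatedPairsB, relatedGroupsB, List.flatMap_cons, List.flatMap_nil, List.map_cons,
    List.map_nil, List.append_nil, List.cons_append, List.nil_append, List.any_cons,
    List.any_nil, Bool.or_false, pv_if_or]
  rw [pv_group_distrib, pv_group_distrib, pv_group_distrib, pv_group_last]
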